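-- pv_equiv track=rewrite | github.com/flext-sh/flext-ldif | src/flext_ldif/services/dn.py | unescape_dn_value
-- ===== SOURCE A (Python) =====
-- import string
--
-- def unescape_dn_value(value: str) -> str:
--     r"""Unescape special characters in DN value per RFC 4514.
--
--     Handles both hex escape format (\XX) and backslash escape format (\char).
--     Reverses the escaping done by escape_dn_value().
--
--     Args:
--         value: Escaped DN attribute value
--
--     Returns:
--         Unescaped DN value
--
--     Example:
--         >>> FlextLdifDnService.unescape_dn_value("Smith\\2c John")
--         'Smith, John'
--         >>> FlextLdifDnService.unescape_dn_value("User \\#1")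
--         'User #1'
--         >>> FlextLdifDnService.unescape_dn_value("\\ leading space")
--         ' leading space'
--
--     """
--     if not value or "\\" not in value:
--         return value
--
--     result: list[str] = []
--     i = 0
--     while i < len(value):
--         if value[i] == "\\" and i + 1 < len(value):
--             # Check if next two chars are hex digits
--             if i + 2 < len(value) and all(
--                 c in string.hexdigits for c in value[i + 1 : i + 3]
--             ):
--                 # Hex escape format: \XX
--                 hex_code = value[i + 1 : i + 3]
--                 result.append(chr(int(hex_code, 16)))
--                 i += 3
--             else:
--                 # Single character escape: \c
--                 result.append(value[i + 1])
--                 i += 2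
--         else:
--             result.append(value[i])
--             i += 1
--
--     return "".join(result)
-- ===== SOURCE B (Python) =====
-- import re
--
-- _UNESCAPE_RE = re.compile(r'\\(?:([0-9a-fA-F]{2})|(.))', re.DOTALL)
--
--
-- def _unescape_match(m):
--     h = m.group(1)
--     return chr(int(h, 16)) if h is not None else m.group(2)
--
--
-- def unescape_dn_value(value: str) -> str:
--     return _UNESCAPE_RE.sub(_unescape_match, value)
-- ===== Notes on version B (the rewrite author's own statement) =====
-- stated objective: idiomatic
-- what changed: Replaced A's hand-written index loop with explicit slicing, hex checks and a result list by a single compiled-regex re.sub (pattern \\(?:([0-9a-fA-F]{2})|(.)) with DOTALL) whose callback decodes a hex escape or returns the escaped character.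
import Mathlib
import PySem

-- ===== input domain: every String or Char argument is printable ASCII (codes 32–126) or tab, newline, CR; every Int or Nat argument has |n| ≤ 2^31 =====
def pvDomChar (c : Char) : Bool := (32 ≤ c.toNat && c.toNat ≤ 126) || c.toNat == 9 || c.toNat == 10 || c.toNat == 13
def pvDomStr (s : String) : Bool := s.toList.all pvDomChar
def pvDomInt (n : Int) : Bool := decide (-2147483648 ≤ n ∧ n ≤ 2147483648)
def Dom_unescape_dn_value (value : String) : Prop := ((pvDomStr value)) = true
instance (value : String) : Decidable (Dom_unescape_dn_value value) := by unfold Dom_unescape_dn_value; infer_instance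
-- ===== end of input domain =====

-- B replaces A's hand-written index/append loop by one regex substitution (\\ followed by
-- two hex digits, or any single char) with a callback; objective: idiomatic, no speed claim.

-- ===== PORT A =====
-- string.hexdigits
def pvHexdigitsA : List Char := "0123456789abcdefABCDEF".toList

-- value of one hex digit; int(s, 16) on a 2-hexdigit string = foldl over the digits (exact there)
def pvHexValA (c : Char) : Nat :=
  if c.toNat ≤ 57 then c.toNat - 48 else if c.toNat ≤ 70 then c.toNat - 55 else c.toNat - 87

-- the while-loop of A: i counts up, result collects 1-char strings
def pvLoopA (cs : List Char) (i : Nat) : List String :=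
  if h : i < cs.length then
    if h2 : cs[i] = '\\' ∧ i + 1 < cs.length then
      -- value[i+1:i+3] with in-range nonnegative bounds = take 2 after drop (i+1) (exact here)
      if i + 2 < cs.length ∧ ((cs.drop (i+1)).take 2).all (fun c => pvHexdigitsA.contains c) then
        String.singleton (Char.ofNat (((cs.drop (i+1)).take 2).foldl (fun a c => 16 * a + pvHexValA c) 0))
          :: pvLoopA cs (i + 3)
      else
        String.singleton (cs[i+1]'h2.2) :: pvLoopA cs (i + 2)
    else
      String.singleton (cs[i]'h) :: pvLoopA cs (i + 1)
  else []
termination_by cs.length - i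

def unescape_dn_value (value : String) : String :=
  -- '"\\" not in value' is a single-char substring test = char membership (exact)
  if value = "" ∨ ¬ (value.toList.contains '\\') then value
  else String.join (pvLoopA value.toList 0)

-- ===== PORT B =====
-- the regex character class [0-9a-fA-F]
def pvIsHexB (c : Char) : Bool :=
  decide (('0' ≤ c ∧ c ≤ '9') ∨ ('a' ≤ c ∧ c ≤ 'f') ∨ ('A' ≤ c ∧ c ≤ 'F'))

-- digit value used by chr(int(g, 16)) in the callback; exact on [0-9a-fA-F]
def pvHexValB (c : Char) : Nat :=
  if c ≤ '9' then c.toNat - '0'.toNat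
  else if c ≤ 'F' then c.toNat - 'A'.toNat + 10
  else c.toNat - 'a'.toNat + 10

-- hand port of re.sub with pattern \\(?:([0-9a-fA-F]{2})|(.)) under DOTALL: a left-to-right
-- scan that at a backslash consumes two hex digits (hex alternative first) or one char (dot,
-- DOTALL so any char incl. newline), and otherwise copies the char; exact for this pattern
def pvScanB : List Char → List Char
  | [] => []
  | c :: rest =>
    if c = '\\' then
      match rest with
      | [] => ['\\']                                   -- pattern needs a char after \, no match
      | c1 :: rest' =>
        match rest' with
        | c2 :: rest'' =>
          if pvIsHexB c1 && pvIsHexB c2 then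
            Char.ofNat (16 * pvHexValB c1 + pvHexValB c2) :: pvScanB rest''
          else c1 :: pvScanB (c2 :: rest'')
        | [] => [c1]
    else c :: pvScanB rest
termination_by l => l.length
decreasing_by all_goals (simp [List.length]; try omega)

def unescape_dn_value_alt (value : String) : String := String.ofList (pvScanB value.toList)

-- ===== PRECONDITION & SPEC =====
def Spec_unescape_dn_value (value : String) (out : String) : Prop := out = unescape_dn_value_alt value
instance (value : String) (out : String) : Decidable (Spec_unescape_dn_value value out) := by unfold Spec_unescape_dn_value; infer_instance

-- ===== CLAIM (what is proved, stated in full; the proofs are below) =====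
def Claim_equal_unescape_dn_value : Prop := ∀ (value : String), Dom_unescape_dn_value value → Spec_unescape_dn_value value (unescape_dn_value value)


-- ===== LEMMAS AND PROOFS =====

-- string.hexdigits membership coincides with the regex class [0-9a-fA-F]
lemma pvHexAgree (c : Char) : pvHexdigitsA.contains c = pvIsHexB c := by
  have h : pvHexdigitsA = ['0','1','2','3','4','5','6','7','8','9','a','b','c','d','e','f','A','B','C','D','E','F'] := by decide
  rw [h, Bool.eq_iff_iff]
  simp [pvIsHexB, Char.ext_iff, ← UInt32.toNat_inj, Char.toNat_val, Char.le_def,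
    UInt32.le_iff_toNat_le]
  omega

-- the two digit-value helpers agree on hex digits
lemma pvHexValAgree (c : Char) (h : pvIsHexB c = true) : pvHexValA c = pvHexValB c := by
  simp only [pvIsHexB, decide_eq_true_eq, Char.le_def, UInt32.le_iff_toNat_le,
    Char.toNat_val] at h
  simp only [pvHexValA, pvHexValB, Char.le_def, UInt32.le_iff_toNat_le, Char.toNat_val]
  simp only [show ('0' : Char).toNat = 48 from by decide,
    show ('9' : Char).toNat = 57 from by decide, show ('a' : Char).toNat = 97 from by decide,
    show ('f' : Char).toNat = 102 from by decide, show ('A' : Char).toNat = 65 from by decide,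
    show ('F' : Char).toNat = 70 from by decide] at h ⊢
  split_ifs <;> omega

-- the regex never matches in a backslash-free string, so the scan copies it
lemma pvScanB_id (l : List Char) (h : '\\' ∉ l) : pvScanB l = l := by
  induction l with
  | nil => rw [pvScanB]
  | cons c rest ih =>
    have hc : c ≠ '\\' := fun hh => h (hh ▸ List.mem_cons_self)
    have hr : '\\' ∉ rest := fun hh => h (List.mem_cons_of_mem _ hh)
    conv_lhs => rw [pvScanB.eq_def]
    simp only [if_neg hc, ih hr]

-- A's while-loop from position i computes B's scan of the suffix, one 1-char string per char
lemma pvLoopA_eq (cs : List Char) : ∀ (n i : Nat), cs.length - i ≤ n →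
    pvLoopA cs i = (pvScanB (cs.drop i)).map String.singleton := by
  intro n
  induction n with
  | zero =>
    intro i hi
    have hle : cs.length ≤ i := by omega
    rw [pvLoopA, dif_neg (by omega), List.drop_of_length_le hle, pvScanB]
    rfl
  | succ n ih =>
    intro i hi
    by_cases h : i < cs.length
    · have hd : cs.drop i = cs[i] :: cs.drop (i+1) := List.drop_eq_getElem_cons h
      rw [pvLoopA, dif_pos h]
      by_cases h2 : cs[i] = '\\' ∧ i + 1 < cs.length
      · have hd1 : cs.drop (i+1) = cs[i+1] :: cs.drop (i+2) := List.drop_eq_getElem_cons h2.2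
        rw [dif_pos h2]
        by_cases h4 : i + 2 < cs.length
        · have hd2 : cs.drop (i+2) = cs[i+2] :: cs.drop (i+3) := List.drop_eq_getElem_cons h4
          have htake : (cs.drop (i+1)).take 2 = [cs[i+1], cs[i+2]] := by
            rw [hd1, hd2]; rfl
          by_cases h5 : pvHexdigitsA.contains (cs[i+1]) = true ∧
              pvHexdigitsA.contains (cs[i+2]) = true
          · have h3 : i + 2 < cs.length ∧
                ((cs.drop (i+1)).take 2).all (fun c => pvHexdigitsA.contains c) := by
              refine ⟨h4, ?_⟩
              rw [htake]
              simp only [List.all_cons, List.all_nil, h5.1, h5.2, Bool.and_true]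
            have hb1 : pvIsHexB (cs[i+1]) = true := by rw [← pvHexAgree]; exact h5.1
            have hb2 : pvIsHexB (cs[i+2]) = true := by rw [← pvHexAgree]; exact h5.2
            rw [if_pos h3, htake, ih (i+3) (by omega), hd, hd1, hd2, h2.1]
            conv_rhs => rw [pvScanB.eq_def]
            simp only [hb1, hb2, Bool.and_self, if_true, List.foldl, List.map_cons,
              List.cons.injEq]
            exact ⟨by rw [pvHexValAgree _ hb1, pvHexValAgree _ hb2]; ring_nf, trivial⟩
          · have h3 : ¬ (i + 2 < cs.length ∧
                ((cs.drop (i+1)).take 2).all (fun c => pvHexdigitsA.contains c)) := by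
              intro hh
              apply h5
              have := hh.2
              rw [htake] at this
              simp only [List.all_cons, List.all_nil, Bool.and_true, Bool.and_eq_true] at this
              exact this
            have hb : (pvIsHexB (cs[i+1]) && pvIsHexB (cs[i+2])) = false := by
              rw [← pvHexAgree, ← pvHexAgree]
              cases hx : pvHexdigitsA.contains (cs[i+1]) with
              | false => simp
              | true =>
                cases hy : pvHexdigitsA.contains (cs[i+2]) with
                | false => simp
                | true => exact absurd ⟨hx, hy⟩ h5
            rw [if_neg h3, ih (i+2) (by omega), hd, hd1, hd2, h2.1]
            conv_rhs => rw [pvScanB.eq_def]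
            simp [hb, ← hd2]
        · -- exactly one character after the backslash: single-char escape in A, dot in B
          have h3 : ¬ (i + 2 < cs.length ∧
              ((cs.drop (i+1)).take 2).all (fun c => pvHexdigitsA.contains c)) := by
            intro hh; exact h4 hh.1
          have hd2 : cs.drop (i+2) = [] := List.drop_of_length_le (by omega)
          rw [if_neg h3, ih (i+2) (by omega), hd, hd1, hd2, h2.1]
          conv_rhs => rw [pvScanB.eq_def]
          simp [pvScanB]
      · rw [dif_neg h2]
        by_cases hc : cs[i] = '\\'
        · -- trailing lone backslash: left as-is by both
          have hge : cs.length ≤ i + 1 := by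
            by_contra hh; exact h2 ⟨hc, by omega⟩
          have hd1 : cs.drop (i+1) = [] := List.drop_of_length_le hge
          rw [ih (i+1) (by omega), hd, hd1, hc]
          conv_rhs => rw [pvScanB.eq_def]
          simp [pvScanB]
        · rw [ih (i+1) (by omega), hd]
          conv_rhs => rw [pvScanB.eq_def]
          simp only [if_neg hc, List.map_cons]
    · have hd : cs.drop i = [] := List.drop_of_length_le (by omega)
      rw [pvLoopA, dif_neg h, hd, pvScanB]
      rfl

-- joining singletons is rebuilding the string
lemma pvJoinSingleton (l : List Char) :
    String.join (l.map String.singleton) = String.ofList l := by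
  rw [String.join_eq]
  congr 1
  induction l with
  | nil => rfl
  | cons c rest ih => simp_all

-- ===== VERDICT (by name: the statement is the Claim_ definition above) =====
theorem unescape_dn_value_spec : Claim_equal_unescape_dn_value := by
  intro value _
  unfold Spec_unescape_dn_value unescape_dn_value unescape_dn_value_alt
  by_cases hg : value = "" ∨ ¬ (value.toList.contains '\\')
  · rw [if_pos hg]
    have hnil : pvScanB [] = [] := by rw [pvScanB]
    rcases hg with hg | hg
    · subst hg
      rw [show ("" : String).toList = [] from rfl, hnil]
    · have hnm : '\\' ∉ value.toList := by
        intro hm; exact hg (List.contains_iff_mem.mpr (by simpa using hm))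
      rw [pvScanB_id _ hnm, String.ofList_toList]
  · rw [if_neg hg]
    rw [pvLoopA_eq value.toList (value.toList.length) 0 (by omega)]
    simp only [List.drop_zero]
    exact pvJoinSingleton _
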